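-- pv_equiv track=rewrite | github.com/cnorthwood/adventofcode | 2024/09/challenge.py | compact
-- ===== SOURCE A (Python) =====
-- def compact(contents):
--     contents = contents[:]
--     try:
--         while next_free := contents.index(None):
--             item = contents.pop()
--             if item is None:
--                 continue
--             contents[next_free] = item
--     except ValueError:
--         return contents
-- ===== SOURCE B (Python) =====
-- def compact(contents):
--     n = sum(1 for x in contents if x is not None)
--     fillers = (x for x in reversed(contents) if x is not None)
--     return [x if x is not None else next(fillers) for x in contents[:n]]
-- ===== Notes on version B (the rewrite author's own statement) =====
-- stated objective: faster
-- what changed: Replaces the repeated list.index(None)+pop loop with one counting pass plus a single zip of the length-n prefix against a reversed generator of non-None items (two pointers in one pass).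
-- outside the precondition, e.g. on compact([None, 1]): A returns None, B returns [1]
import Mathlib
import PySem

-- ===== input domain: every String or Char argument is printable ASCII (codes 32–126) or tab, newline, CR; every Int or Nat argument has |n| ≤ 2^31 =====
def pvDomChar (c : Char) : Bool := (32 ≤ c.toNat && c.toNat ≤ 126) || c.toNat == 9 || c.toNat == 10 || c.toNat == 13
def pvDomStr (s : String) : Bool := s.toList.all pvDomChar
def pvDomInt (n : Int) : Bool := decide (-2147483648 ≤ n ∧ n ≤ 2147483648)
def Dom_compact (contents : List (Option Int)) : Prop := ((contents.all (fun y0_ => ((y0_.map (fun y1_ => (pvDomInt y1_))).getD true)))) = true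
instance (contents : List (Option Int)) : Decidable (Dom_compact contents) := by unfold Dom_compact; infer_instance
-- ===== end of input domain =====

-- B is a one-pass two-pointer compaction (count, then fill the length-n prefix from a reversed
-- stream of non-None items) instead of A's quadratic index/pop loop. A mutates only its local copy.

-- ===== PORT A =====
-- while next_free := contents.index(None): pop the last item; if non-None, write it at next_free.
-- Fuel = current length: the list shrinks by exactly one element per iteration.
def compactGo : Nat → List (Option Int) → List (Option Int)
  | 0, l => l
  | fuel+1, l =>
    match PySem.List.index? l Option.none with
    | Option.none => l            -- ValueError: return contents
    | some nf =>
      if nf = 0 then l            -- while-condition falsy: Python falls through (returns None); outside Pre_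
      else
        match PySem.List.pop? l (-1) with
        | Option.none => l        -- unreachable: l is nonempty here
        | some (item, rest) =>
          match item with
          | Option.none => compactGo fuel rest
          | some v => compactGo fuel (rest.set nf (some v))

def compact (contents : List (Option Int)) : List (Option Int) :=
  compactGo contents.length contents

-- ===== PORT B =====
-- the list comprehension zipping contents[:n] against the generator of fillers
def fillB : List (Option Int) → List Int → List (Option Int)
  | [], _ => []
  | Option.some x :: rest, fs => Option.some x :: fillB rest fs
  | Option.none :: rest, f :: fs => Option.some f :: fillB rest fs
  | Option.none :: _, [] => []    -- generator exhausted: unreachable (fillers always suffice)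

def compact_alt (contents : List (Option Int)) : List (Option Int) :=
  let n := (contents.filter Option.isSome).length
  let fillers := contents.reverse.filterMap id
  fillB (contents.take n) fillers

-- ===== PRECONDITION & SPEC =====
-- Pre_ excludes lists whose first element is None: there A's while-condition (index 0) is falsy at
-- once and the function falls through returning Python None, which is not a list value.
def Pre_compact (contents : List (Option Int)) : Prop :=
  contents.head? ≠ some Option.none
instance (contents : List (Option Int)) : Decidable (Pre_compact contents) := by
  unfold Pre_compact; infer_instance

def pvWitness_compact : List (Option Int) := [some 1, Option.none, some 2]

def Spec_compact (contents : List (Option Int)) (out : List (Option Int)) : Prop := out = compact_alt contents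
instance (contents : List (Option Int)) (out : List (Option Int)) : Decidable (Spec_compact contents out) := by unfold Spec_compact; infer_instance

-- ===== CLAIM (what is proved, stated in full; the proofs are below) =====
def Claim_equal_compact : Prop := ∀ (contents : List (Option Int)), Dom_compact contents → Pre_compact contents → Spec_compact contents (compact contents)

-- ===== LEMMAS AND PROOFS =====

theorem fillB_of_not_mem (l : List (Option Int)) (fs : List Int)
    (h : Option.none ∉ l) : fillB l fs = l := by
  induction l generalizing fs with
  | nil => rfl
  | cons x rest ih =>
    match x with
    | Option.none => simp at h
    | some v =>
      simp only [List.mem_cons, not_or] at h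
      simp [fillB, ih fs h.2]

theorem cnt_of_not_mem (l : List (Option Int)) (h : Option.none ∉ l) :
    (l.filter Option.isSome).length = l.length := by
  induction l with
  | nil => rfl
  | cons x rest ih =>
    simp only [List.mem_cons, not_or] at h
    match x with
    | Option.none => exact absurd rfl h.1
    | some v => simp [List.filter, ih h.2]

theorem compact_alt_of_not_mem (l : List (Option Int)) (h : Option.none ∉ l) :
    compact_alt l = l := by
  simp only [compact_alt]
  rw [cnt_of_not_mem l h, List.take_length, fillB_of_not_mem l _ h]

theorem len_filterMap_id (l : List (Option Int)) :
    (l.filterMap id).length = (l.filter Option.isSome).length := by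
  induction l with
  | nil => rfl
  | cons x rest ih =>
    match x with
    | Option.none => simpa [List.filterMap, List.filter] using ih
    | some v => simpa [List.filterMap, List.filter] using ih

theorem cnt_le_length (l : List (Option Int)) :
    (l.filter Option.isSome).length ≤ l.length := List.length_filter_le _ _

-- dropping a trailing None changes nothing
theorem compact_alt_snoc_none (q : List (Option Int)) :
    compact_alt (q ++ [Option.none]) = compact_alt q := by
  simp only [compact_alt]
  have hcnt : ((q ++ [Option.none]).filter Option.isSome).length
      = (q.filter Option.isSome).length := by simp
  have htake : (q ++ [Option.none]).take ((q.filter Option.isSome).length)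
      = q.take ((q.filter Option.isSome).length) :=
    List.take_append_of_le_length (cnt_le_length q)
  rw [hcnt, htake]
  have : (q ++ [Option.none]).reverse.filterMap id = q.reverse.filterMap id := by simp
  rw [this]

-- fillB over an all-Some prefix just copies it
theorem fillB_append_all_some (p t : List (Option Int)) (fs : List Int)
    (hp : Option.none ∉ p) : fillB (p ++ t) fs = p ++ fillB t fs := by
  induction p generalizing fs with
  | nil => rfl
  | cons x rest ih =>
    simp only [List.mem_cons, not_or] at hp
    match x with
    | Option.none => exact absurd rfl hp.1
    | some v => simp [fillB, ih fs hp.2]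

-- fillB only reads as many fillers as there are Nones
theorem fillB_ext (t : List (Option Int)) (fs1 fs2 fs2' : List Int)
    (h : (t.filter Option.isNone).length ≤ fs1.length) :
    fillB t (fs1 ++ fs2) = fillB t (fs1 ++ fs2') := by
  induction t generalizing fs1 with
  | nil => rfl
  | cons x rest ih =>
    match x with
    | some v =>
      have h' : (rest.filter Option.isNone).length ≤ fs1.length := by
        simpa [List.filter] using h
      simp [fillB, ih fs1 h']
    | Option.none =>
      match fs1 with
      | [] => simp [List.filter] at h
      | f :: fs1' =>
        have h' : (rest.filter Option.isNone).length ≤ fs1'.length := by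
          simp [List.filter] at h; omega
        simp [fillB, ih fs1' h']

theorem nones_le_length (l : List (Option Int)) :
    (l.filter Option.isNone).length ≤ l.length := List.length_filter_le _ _

-- the key step: moving the trailing Some v into the first None slot preserves B's result
theorem compact_alt_move (p m : List (Option Int)) (v : Int) (hp : Option.none ∉ p) :
    compact_alt (p ++ Option.none :: m ++ [some v]) = compact_alt (p ++ some v :: m) := by
  simp only [compact_alt]
  have hplen := cnt_of_not_mem p hp
  have hmle := cnt_le_length m
  set c := (m.filter Option.isSome).length with hc
  have hcntL : (((p ++ Option.none :: m ++ [some v])).filter Option.isSome).length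
      = p.length + (c + 1) := by simp [hplen, hc]
  have hcntR : (((p ++ some v :: m)).filter Option.isSome).length
      = p.length + (c + 1) := by simp [hplen, hc]
  rw [hcntL, hcntR]
  have htakeL : (p ++ Option.none :: m ++ [some v]).take (p.length + (c + 1))
      = p ++ Option.none :: m.take c := by
    have h1 : p ++ Option.none :: m ++ [some v] = p ++ ((Option.none :: m) ++ [some v]) := by simp
    rw [h1, List.take_append, List.take_append]
    have e1 : p.take (p.length + (c+1)) = p := List.take_of_length_le (by omega)
    have e2 : p.length + (c+1) - p.length = c + 1 := by omega
    have e3 : (Option.none :: m).take (c+1) = Option.none :: m.take c := rfl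
    have e4 : c + 1 - (Option.none :: m).length = 0 := by simp; omega
    rw [e1, e2, e3, e4]
    simp
  have htakeR : (p ++ some v :: m).take (p.length + (c + 1))
      = p ++ some v :: m.take c := by
    rw [List.take_append]
    have e1 : p.take (p.length + (c+1)) = p := List.take_of_length_le (by omega)
    have e2 : p.length + (c+1) - p.length = c + 1 := by omega
    rw [e1, e2]
    rfl
  rw [htakeL, htakeR]
  have hfillL : (p ++ Option.none :: m ++ [some v]).reverse.filterMap id
      = v :: (m.reverse.filterMap id ++ p.reverse.filterMap id) := by simp
  have hfillR : (p ++ some v :: m).reverse.filterMap id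
      = m.reverse.filterMap id ++ v :: p.reverse.filterMap id := by simp
  rw [hfillL, hfillR]
  rw [fillB_append_all_some _ _ _ hp, fillB_append_all_some _ _ _ hp]
  simp only [fillB]
  have hX : (m.reverse.filterMap id).length = c := by
    rw [len_filterMap_id, List.filter_reverse, List.length_reverse, hc]
  have hnones : ((m.take c).filter Option.isNone).length ≤ (m.reverse.filterMap id).length := by
    calc ((m.take c).filter Option.isNone).length ≤ (m.take c).length := nones_le_length _
      _ ≤ c := by simp
      _ = _ := hX.symm
  exact congrArg (fun t => p ++ some v :: t)
    (fillB_ext (m.take c) (m.reverse.filterMap id)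
      (p.reverse.filterMap id) (v :: p.reverse.filterMap id) hnones)

theorem compact_main : ∀ (k : Nat) (l : List (Option Int)), l.length = k →
    Pre_compact l → compactGo k l = compact_alt l := by
  intro k
  induction k with
  | zero =>
    intro l hlen _
    have : l = [] := List.eq_nil_of_length_eq_zero hlen
    subst this; rfl
  | succ n ih =>
    intro l hlen hpre
    show compactGo (n+1) l = compact_alt l
    rw [compactGo]
    match hidx : PySem.List.index? l Option.none with
    | Option.none =>
      have hmem : Option.none ∉ l := (PySem.List.index?_eq_none_iff _ _).mp hidx
      simp [compact_alt_of_not_mem l hmem]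
    | some nf =>
      obtain ⟨pre, suf, hl, hplen, hnp⟩ := (PySem.List.index?_eq_some_iff _ _ _).mp hidx
      have hnf : nf ≠ 0 := by
        intro h0
        apply hpre
        have : pre = [] := List.eq_nil_of_length_eq_zero (by omega)
        rw [hl, this]; rfl
      have hpre_ne : pre ≠ [] := by
        intro h; apply hnf; rw [← hplen, h]; rfl
      obtain ⟨a, pre', rfl⟩ : ∃ a pre', pre = a :: pre' := by
        match pre, hpre_ne with
        | a :: pre', _ => exact ⟨a, pre', rfl⟩
      have ha : a ≠ Option.none := by
        intro h; apply hpre; rw [hl, h]; rfl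
      have hlne : l ≠ [] := by rw [hl]; simp
      match hsuf : suf with
      | [] =>
        -- last element is the None itself: pop it ("continue" branch)
        have hqx : l = (a :: pre') ++ [Option.none] := by rw [hl]
        have hpop : PySem.List.pop? l (-1) = some (Option.none, a :: pre') := by
          rw [hqx]; exact PySem.List.pop?_last _ _
        simp only [hnf, if_false, hpop]
        show compactGo n (a :: pre') = compact_alt l
        have hqlen : (a :: pre').length = n := by
          have : l.length = (a :: pre').length + 1 := by rw [hqx]; simp
          omega
        have hqpre : Pre_compact (a :: pre') := by
          unfold Pre_compact
          simpa using ha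
        rw [ih _ hqlen hqpre]
        rw [hqx, compact_alt_snoc_none]
      | b :: suf' =>
        -- suf nonempty: split off its last element
        have hsne : b :: suf' ≠ [] := by simp
        have hsufsplit : b :: suf' = (b :: suf').dropLast ++ [(b :: suf').getLast hsne] :=
          (List.dropLast_append_getLast hsne).symm
        set m := (b :: suf').dropLast with hm
        set x := (b :: suf').getLast hsne with hx
        have hqx : l = ((a :: pre') ++ Option.none :: m) ++ [x] := by
          rw [hl]; conv_lhs => rw [hsufsplit]
          simp
        have hpop : PySem.List.pop? l (-1) = some (x, (a :: pre') ++ Option.none :: m) := by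
          rw [hqx]; exact PySem.List.pop?_last _ _
        simp only [hnf, if_false, hpop]
        have hllen : l.length = (a :: pre').length + 1 + m.length + 1 := by
          rw [hqx]; simp; omega
        match x with
        | Option.none =>
          -- popped a None: recurse on the shorter list
          show compactGo n ((a :: pre') ++ Option.none :: m) = compact_alt l
          have hqlen : ((a :: pre') ++ Option.none :: m).length = n := by
            simp at hllen ⊢; omega
          have hqpre : Pre_compact ((a :: pre') ++ Option.none :: m) := by
            unfold Pre_compact; simpa using ha
          rw [ih _ hqlen hqpre]
          rw [hqx]
          rw [show (a :: pre') ++ Option.none :: m ++ [Option.none]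
              = ((a :: pre') ++ Option.none :: m) ++ [Option.none] by simp] at *
          rw [compact_alt_snoc_none]
        | some v =>
          -- popped Some v: write it into the first free slot, recurse
          show compactGo n (((a :: pre') ++ Option.none :: m).set nf (some v)) = compact_alt l
          have hset : (((a :: pre') ++ Option.none :: m).set nf (some v))
              = (a :: pre') ++ some v :: m := by
            rw [← hplen, List.set_append_right _ _ (le_refl _)]
            simp
          rw [hset]
          have hqlen : ((a :: pre') ++ some v :: m).length = n := by
            simp at hllen ⊢; omega
          have hqpre : Pre_compact ((a :: pre') ++ some v :: m) := by
            unfold Pre_compact; simpa using ha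
          rw [ih _ hqlen hqpre]
          have : compact_alt l = compact_alt ((a :: pre') ++ some v :: m) := by
            rw [hqx, show ((a :: pre') ++ Option.none :: m) ++ [some v]
                = (a :: pre') ++ Option.none :: m ++ [some v] by simp]
            exact compact_alt_move (a :: pre') m v (by
              intro hmem
              rcases List.mem_cons.mp hmem with h | h
              · exact ha h.symm
              · exact hnp (List.mem_cons_of_mem _ h))
          rw [this]

-- ===== VERDICT (by name: the statement is the Claim_ definition above) =====
theorem compact_spec : Claim_equal_compact := by
  intro contents _ hpre
  unfold Spec_compact compact
  exact compact_main contents.length contents rfl hpre
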